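-- pv_equiv track=rewrite | github.com/daniel-reich/ubiquitous-fiesta | vudQZFD64nDWkKz8a_6.py | grant_the_hint
-- ===== SOURCE A (Python) =====
-- def grant_the_hint(txt):
--   txt_array = txt.split(" ")
--   max_length = len(max(txt.split(" "), key=len))
--   H = list()
--   for n in range(max_length+1):
--     hint = [word[:n] + '_'*(len(word)-n) for word in txt_array]
--     H.append(' '.join(hint))
--   return H
-- ===== SOURCE B (Python) =====
-- def grant_the_hint(txt):
--     words = txt.split(" ")
--     max_length = max(len(w) for w in words)
--     buf = [['_'] * len(w) for w in words]
--     H = [' '.join(''.join(b) for b in buf)]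
--     for n in range(max_length):
--         for w, b in zip(words, buf):
--             if n < len(w):
--                 b[n] = w[n]
--         H.append(' '.join(''.join(b) for b in buf))
--     return H
-- ===== Notes on version B (the rewrite author's own statement) =====
-- stated objective: alternative
-- what changed: B maintains one progressively-revealed mutable buffer (writing a single character per word per step) instead of re-slicing every word and re-building each hint string from scratch for every length n.
import Mathlib
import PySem

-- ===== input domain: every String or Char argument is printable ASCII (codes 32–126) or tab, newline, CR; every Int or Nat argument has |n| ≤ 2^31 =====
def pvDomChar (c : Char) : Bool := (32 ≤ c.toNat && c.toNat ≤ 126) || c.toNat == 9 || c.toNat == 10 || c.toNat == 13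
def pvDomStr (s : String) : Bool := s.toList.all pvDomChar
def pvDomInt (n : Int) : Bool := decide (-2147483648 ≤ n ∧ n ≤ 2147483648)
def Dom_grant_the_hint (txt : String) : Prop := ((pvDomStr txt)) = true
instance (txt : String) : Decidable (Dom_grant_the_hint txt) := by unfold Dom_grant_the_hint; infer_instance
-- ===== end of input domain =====

-- B replaces A's per-step re-slicing of every word by a progressively revealed buffer
-- (one character written per step); equivalence of the RETURN value is proved (objective: alternative).

-- ===== PORT A =====
def grant_the_hint (txt : String) : List String :=
  let txtArray := PySem.Chars.splitOn txt.toList [' ']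
  let maxLength := ((PySem.List.max? (PySem.Chars.splitOn txt.toList [' ']) (fun w => w.length)).getD []).length
  (PySem.List.pyRange 0 ((maxLength : Int) + 1) 1).foldl
    (fun H n =>
      let hint := txtArray.map (fun word =>
        PySem.List.slice word none (some n) ++ PySem.List.pyRepeat ['_'] ((word.length : Int) - n))
      H ++ [String.ofList (PySem.Chars.join [' '] hint)]) []

-- ===== PORT B =====
def grant_the_hint_alt (txt : String) : List String :=
  let words := PySem.Chars.splitOn txt.toList [' ']
  let maxLength := ((PySem.List.max? words (fun w => w.length)).getD []).length
  let buf0 := words.map (fun w => List.replicate w.length '_')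
  let render := fun (buf : List (List Char)) => String.ofList (PySem.Chars.join [' '] buf)
  let res := (List.range maxLength).foldl
    (fun (st : List (List Char) × List String) n =>
      let buf' := (words.zip st.1).map (fun p =>
        if n < p.1.length then p.2.set n (p.1.getD n ' ') else p.2)
      (buf', st.2 ++ [render buf'])) (buf0, [render buf0])
  res.2

-- ===== PRECONDITION & SPEC =====
def Spec_grant_the_hint (txt : String) (out : List String) : Prop := out = grant_the_hint_alt txt
instance (txt : String) (out : List String) : Decidable (Spec_grant_the_hint txt out) := by unfold Spec_grant_the_hint; infer_instance

-- ===== CLAIM (what is proved, stated in full; the proofs are below) =====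
def Claim_equal_grant_the_hint : Prop := ∀ (txt : String), Dom_grant_the_hint txt → Spec_grant_the_hint txt (grant_the_hint txt)

-- ===== LEMMAS AND PROOFS =====

/-- The common normal form of one hint word: `n` revealed characters, the rest underscores. -/
def pvHint (n : Nat) (w : List Char) : List Char := w.take n ++ List.replicate (w.length - n) '_'

theorem pvHint_step (n : Nat) (w : List Char) :
    (if n < w.length then (pvHint n w).set n (w.getD n ' ') else pvHint n w) = pvHint (n+1) w := by
  by_cases h : n < w.length
  · simp only [h, if_pos, pvHint]
    have hrep : w.length - n = (w.length - (n+1)) + 1 := by omega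
    have htk : (w.take n).length = n := by simp; omega
    rw [hrep, List.replicate_succ]
    rw [List.set_append_right _ _ (by omega)]
    have hget : w.getD n ' ' = w[n]'h := by
      simp [List.getD, List.getElem?_eq_getElem h]
    rw [htk, Nat.sub_self, List.set_cons_zero, hget]
    have : w.take (n+1) = w.take n ++ [w[n]'h] := by
      rw [List.take_add_one]; simp [List.getElem?_eq_getElem h]
    rw [this, List.append_assoc, List.singleton_append]
  · simp only [h, if_neg, pvHint, not_false_iff]
    have h1 : w.take n = w := List.take_of_length_le (by omega)
    have h2 : w.take (n+1) = w := List.take_of_length_le (by omega)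
    rw [h1, h2]
    rw [Nat.sub_eq_zero_of_le (Nat.le_of_not_lt h), Nat.sub_eq_zero_of_le (by omega)]

theorem pvStep_map (n : Nat) (ws : List (List Char)) :
    (ws.zip (ws.map (pvHint n))).map (fun p =>
        if n < p.1.length then p.2.set n (p.1.getD n ' ') else p.2)
      = ws.map (pvHint (n+1)) := by
  induction ws with
  | nil => rfl
  | cons w t ih =>
    simp only [List.map_cons, List.zip_cons_cons, ih, List.cons.injEq, and_true]
    exact pvHint_step n w

/-- The B-side loop invariant: after `M` steps the buffer is `pvHint M` of each word and the
output list holds the renderings for 0..M. -/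
theorem pvLoopB (ws : List (List Char)) (M : Nat) :
    (List.range M).foldl
      (fun (st : List (List Char) × List String) n =>
        ((ws.zip st.1).map (fun p =>
            if n < p.1.length then p.2.set n (p.1.getD n ' ') else p.2),
         st.2 ++ [String.ofList (PySem.Chars.join [' ']
            ((ws.zip st.1).map (fun p =>
              if n < p.1.length then p.2.set n (p.1.getD n ' ') else p.2)))]))
      (ws.map (pvHint 0), [String.ofList (PySem.Chars.join [' '] (ws.map (pvHint 0)))])
    = (ws.map (pvHint M), (List.range (M+1)).map
        (fun n => String.ofList (PySem.Chars.join [' '] (ws.map (pvHint n))))) := by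
  induction M with
  | zero => simp [List.range_succ]
  | succ M ih =>
    rw [List.range_succ, List.foldl_append, ih]
    simp only [List.foldl_cons, List.foldl_nil, pvStep_map]
    rw [List.range_succ (n := M + 1), List.map_append]
    simp

theorem pvB_eq (txt : String) :
    grant_the_hint_alt txt =
      (List.range (((PySem.List.max? (PySem.Chars.splitOn txt.toList [' '])
          (fun w => w.length)).getD []).length + 1)).map
        (fun n => String.ofList (PySem.Chars.join [' ']
            ((PySem.Chars.splitOn txt.toList [' ']).map (pvHint n)))) := by
  unfold grant_the_hint_alt
  simp only []
  have h0 : (PySem.Chars.splitOn txt.toList [' ']).map (fun w => List.replicate w.length '_')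
      = (PySem.Chars.splitOn txt.toList [' ']).map (pvHint 0) := by
    simp [pvHint]
  rw [h0]
  rw [pvLoopB (PySem.Chars.splitOn txt.toList [' '])]

theorem pvA_eq (txt : String) :
    grant_the_hint txt =
      (List.range (((PySem.List.max? (PySem.Chars.splitOn txt.toList [' '])
          (fun w => w.length)).getD []).length + 1)).map
        (fun n => String.ofList (PySem.Chars.join [' ']
            ((PySem.Chars.splitOn txt.toList [' ']).map (pvHint n)))) := by
  unfold grant_the_hint
  simp only []
  set ws := PySem.Chars.splitOn txt.toList [' '] with hws
  set M := ((PySem.List.max? ws (fun w => w.length)).getD []).length with hM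
  rw [PySem.List.pyRange_one]
  have htn : (((M : Int) + 1) - 0).toNat = M + 1 := by omega
  rw [htn, List.foldl_map, PySem.List.foldl_append_singleton_eq_map, List.nil_append]
  apply List.map_congr_left
  intro k _
  congr 2
  apply List.map_congr_left
  intro w _
  have h1 : PySem.List.slice w none (some ((0 : Int) + (k : Int))) = w.take k := by
    rw [zero_add, PySem.List.slice_to_natCast]
  have h2 : PySem.List.pyRepeat ['_'] ((w.length : Int) - ((0 : Int) + (k : Int)))
      = List.replicate (w.length - k) '_' := by
    rw [PySem.List.pyRepeat_singleton]
    congr 1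
    omega
  rw [h1, h2]
  rfl

-- ===== VERDICT (by name: the statement is the Claim_ definition above) =====
theorem grant_the_hint_spec : Claim_equal_grant_the_hint := by
  intro txt _
  unfold Spec_grant_the_hint
  rw [pvA_eq, pvB_eq]
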